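-- pv_equiv track=rewrite | github.com/kensekense/Masters-Thesis | src/ltl.py | precedence
-- ===== SOURCE A (Python) =====
-- def precedence (trace, scope, condition1, condition2):
--
--     assert type(trace) == list
--     assert type(scope) == list
--     assert type(condition1) == list
--     assert type(condition2) == list
--
--     sol = []
--
--     for subsequence in scope:
--         c1 = -1
--         c2 = -1
--         ind = 0
--         for item in trace[subsequence[0]: subsequence[1]+1]:
--             if item in condition1 and c1 == -1:
--                 c1 = ind
--             if item in condition2 and c2 == -1:
--                 c2 = ind
--             ind += 1
--         if (c1 < c2) or (c1 == -1 or c2 == -1):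
--             sol.append(True)
--         else:
--             sol.append(False)
--
--     return sol
-- ===== SOURCE B (Python) =====
-- def precedence(trace, scope, condition1, condition2):
--     s1 = set(condition1)
--     s2 = set(condition2)
--
--     def check(window):
--         # first element belonging to either condition set decides (almost) everything
--         for i, x in enumerate(window):
--             if x in s1:
--                 return x not in s2
--             if x in s2:
--                 return not any(y in s1 for y in window[i+1:])
--         return True
--
--     return [check(trace[s[0]:s[1]+1]) for s in scope]
-- ===== Notes on version B (the rewrite author's own statement) =====
-- stated objective: faster
-- what changed: Replaces the indexed sentinel scan (tracking c1/c2 = -1 first-occurrence indices over the whole window with 'item in list' tests, then comparing) by an early-exit scan over precomputed hash sets: the first window element in either condition set decides the answer (a cond1 hit returns immediately; a cond2-only hit only checks whether cond1 occurs later); Pre_ excludes scope entries of length < 2, on which A raises IndexError.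
import Mathlib
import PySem

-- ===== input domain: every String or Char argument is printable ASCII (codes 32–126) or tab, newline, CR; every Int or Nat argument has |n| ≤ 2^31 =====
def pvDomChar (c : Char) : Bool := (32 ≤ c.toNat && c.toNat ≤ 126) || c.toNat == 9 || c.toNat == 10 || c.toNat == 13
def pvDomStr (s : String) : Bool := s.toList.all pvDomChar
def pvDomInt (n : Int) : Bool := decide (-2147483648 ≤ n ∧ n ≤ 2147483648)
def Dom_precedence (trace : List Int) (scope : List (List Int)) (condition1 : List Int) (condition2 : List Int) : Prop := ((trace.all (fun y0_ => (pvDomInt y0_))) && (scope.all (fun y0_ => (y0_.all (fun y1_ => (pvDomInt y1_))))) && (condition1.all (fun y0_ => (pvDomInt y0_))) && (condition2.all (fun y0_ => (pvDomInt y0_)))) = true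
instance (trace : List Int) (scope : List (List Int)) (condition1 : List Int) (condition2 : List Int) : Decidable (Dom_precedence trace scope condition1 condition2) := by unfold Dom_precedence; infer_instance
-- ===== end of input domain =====

-- B replaces A's indexed sentinel scan (two -1-initialised first-occurrence indices per window,
-- compared afterwards) by an early-exit scan over precomputed sets: the first window element in
-- either condition set decides the answer, with set membership replacing list scans (measured faster in a timing run).

-- ===== PORT A =====
-- A's inner loop: state (c1, c2, ind), returning the final (c1, c2).
def precInner (condition1 condition2 : List Int) : List Int → Int → Int → Int → Int × Int
  | [], c1, c2, _ => (c1, c2)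
  | x :: xs, c1, c2, ind =>
      precInner condition1 condition2 xs
        (if x ∈ condition1 ∧ c1 = -1 then ind else c1)
        (if x ∈ condition2 ∧ c2 = -1 then ind else c2)
        (ind + 1)

-- pyGetD is exact for subsequence[0]/[1] under Pre_ (each scope entry has length ≥ 2).
def precedence (trace : List Int) (scope : List (List Int)) (condition1 : List Int) (condition2 : List Int) : List Bool :=
  scope.foldl (fun sol s =>
    let w := PySem.List.slice trace (some (PySem.List.pyGetD s 0 0)) (some (PySem.List.pyGetD s 1 0 + 1))
    let r := precInner condition1 condition2 w (-1) (-1) 0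
    sol ++ [decide (r.1 < r.2 ∨ r.1 = -1 ∨ r.2 = -1)]) []

-- ===== PORT B =====
-- B's early-exit scan: first element in either set decides; `window[i+1:]` is the remaining tail.
def altCheck (s1 s2 : PySem.Set Int) : List Int → Bool
  | [] => true
  | x :: xs =>
      if PySem.Set.contains s1 x then !(PySem.Set.contains s2 x)
      else if PySem.Set.contains s2 x then !(xs.any (fun y => PySem.Set.contains s1 y))
      else altCheck s1 s2 xs

def precedence_alt (trace : List Int) (scope : List (List Int)) (condition1 : List Int) (condition2 : List Int) : List Bool :=
  let s1 := PySem.Set.ofList condition1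
  let s2 := PySem.Set.ofList condition2
  scope.map (fun s =>
    altCheck s1 s2 (PySem.List.slice trace (some (PySem.List.pyGetD s 0 0)) (some (PySem.List.pyGetD s 1 0 + 1))))

-- ===== PRECONDITION & SPEC =====
-- Pre_ excludes scope entries with fewer than 2 elements, on which A (subsequence[1]) raises IndexError.
def Pre_precedence (trace : List Int) (scope : List (List Int)) (condition1 : List Int) (condition2 : List Int) : Prop :=
  ∀ s ∈ scope, 2 ≤ s.length
instance (trace : List Int) (scope : List (List Int)) (condition1 : List Int) (condition2 : List Int) : Decidable (Pre_precedence trace scope condition1 condition2) := by unfold Pre_precedence; infer_instance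
def pvWitness_precedence : List Int × List (List Int) × List Int × List Int := ([1, 2, 3], [[0, 2], [1, 1]], [2], [3])
def Spec_precedence (trace : List Int) (scope : List (List Int)) (condition1 : List Int) (condition2 : List Int) (out : List Bool) : Prop := out = precedence_alt trace scope condition1 condition2
instance (trace : List Int) (scope : List (List Int)) (condition1 : List Int) (condition2 : List Int) (out : List Bool) : Decidable (Spec_precedence trace scope condition1 condition2 out) := by unfold Spec_precedence; infer_instance

-- ===== CLAIM (what is proved, stated in full; the proofs are below) =====
def Claim_equal_precedence : Prop := ∀ (trace : List Int) (scope : List (List Int)) (condition1 : List Int) (condition2 : List Int), Dom_precedence trace scope condition1 condition2 → Pre_precedence trace scope condition1 condition2 → Spec_precedence trace scope condition1 condition2 (precedence trace scope condition1 condition2)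

-- ===== LEMMAS AND PROOFS =====

-- The boolean A computes from the final (c1, c2).
def precDec (p : Int × Int) : Bool := decide (p.1 < p.2 ∨ p.1 = -1 ∨ p.2 = -1)

-- Once both indices are set (≥ 0), the loop never changes them: the verdict is c1 < c2.
theorem precInner_both (c1s c2s : List Int) (w : List Int) (ind c1 c2 : Int)
    (h1 : 0 ≤ c1) (h2 : 0 ≤ c2) :
    precDec (precInner c1s c2s w c1 c2 ind) = decide (c1 < c2) := by
  induction w generalizing ind with
  | nil =>
      simp only [precInner, precDec, decide_eq_decide]
      omega
  | cons x xs ih =>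
      have e1 : ¬ (x ∈ c1s ∧ c1 = -1) := by rintro ⟨_, h⟩; omega
      have e2 : ¬ (x ∈ c2s ∧ c2 = -1) := by rintro ⟨_, h⟩; omega
      simp only [precInner, if_neg e1, if_neg e2]
      exact ih (ind + 1)

-- c1 already set below ind, c2 still unset: the verdict is always True
-- (either c2 stays -1, or c2 gets some index ≥ ind > c1).
theorem precInner_c1 (c1s c2s : List Int) (w : List Int) (ind c1 : Int)
    (h1 : 0 ≤ c1) (hlt : c1 < ind) :
    precDec (precInner c1s c2s w c1 (-1) ind) = true := by
  induction w generalizing ind with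
  | nil => simp [precInner, precDec]
  | cons x xs ih =>
      have e1 : ¬ (x ∈ c1s ∧ c1 = -1) := by rintro ⟨_, h⟩; omega
      simp only [precInner, if_neg e1]
      by_cases hx : x ∈ c2s
      · rw [if_pos (show x ∈ c2s ∧ True from ⟨hx, trivial⟩)]
        rw [precInner_both c1s c2s xs (ind + 1) c1 ind h1 (by omega)]
        exact decide_eq_true hlt
      · rw [if_neg (show ¬ (x ∈ c2s ∧ True) from fun h => hx h.1)]
        exact ih (ind + 1) (by omega)

-- c2 already set below ind, c1 still unset: the verdict is "no cond1 element in the rest".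
theorem precInner_c2 (c1s c2s : List Int) (w : List Int) (ind c2 : Int)
    (h2 : 0 ≤ c2) (hlt : c2 < ind) :
    precDec (precInner c1s c2s w (-1) c2 ind) = !(w.any (fun y => decide (y ∈ c1s))) := by
  induction w generalizing ind with
  | nil =>
      simp only [precInner, precDec, List.any_nil, Bool.not_false]
      simp
  | cons x xs ih =>
      have e2 : ¬ (x ∈ c2s ∧ c2 = -1) := by rintro ⟨_, h⟩; omega
      simp only [precInner, if_neg e2]
      by_cases hx : x ∈ c1s
      · rw [if_pos (show x ∈ c1s ∧ True from ⟨hx, trivial⟩)]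
        rw [precInner_both c1s c2s xs (ind + 1) ind c2 (by omega) h2]
        have hn : ¬ (ind < c2) := by omega
        simp [hx, hn]
      · rw [if_neg (show ¬ (x ∈ c1s ∧ True) from fun h => hx h.1)]
        rw [ih (ind + 1) (by omega)]
        simp [hx]

-- Per-window equivalence of A's scan and B's early-exit scan.
theorem inner_eq_alt (c1s c2s : List Int) (w : List Int) (ind : Int) (hind : 0 ≤ ind) :
    precDec (precInner c1s c2s w (-1) (-1) ind)
      = altCheck (PySem.Set.ofList c1s) (PySem.Set.ofList c2s) w := by
  induction w generalizing ind with
  | nil => simp [precInner, altCheck, precDec]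
  | cons x xs ih =>
      simp only [precInner]
      by_cases hx1 : x ∈ c1s <;> by_cases hx2 : x ∈ c2s
      · rw [if_pos (show x ∈ c1s ∧ True from ⟨hx1, trivial⟩),
            if_pos (show x ∈ c2s ∧ True from ⟨hx2, trivial⟩),
            precInner_both c1s c2s xs (ind + 1) ind ind hind hind]
        simp [altCheck, hx1, hx2]
      · rw [if_pos (show x ∈ c1s ∧ True from ⟨hx1, trivial⟩),
            if_neg (show ¬ (x ∈ c2s ∧ True) from fun h => hx2 h.1),
            precInner_c1 c1s c2s xs (ind + 1) ind hind (by omega)]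
        simp [altCheck, hx1, hx2]
      · rw [if_neg (show ¬ (x ∈ c1s ∧ True) from fun h => hx1 h.1),
            if_pos (show x ∈ c2s ∧ True from ⟨hx2, trivial⟩),
            precInner_c2 c1s c2s xs (ind + 1) ind hind (by omega)]
        simp [altCheck, hx1, hx2]
      · rw [if_neg (show ¬ (x ∈ c1s ∧ True) from fun h => hx1 h.1),
            if_neg (show ¬ (x ∈ c2s ∧ True) from fun h => hx2 h.1),
            ih (ind + 1) (by omega)]
        simp [altCheck, hx1, hx2]

-- A's append-fold over scope is a map.
theorem foldl_append_eq_map_prec (f : List Int → Bool) (scope : List (List Int)) (acc : List Bool) :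
    scope.foldl (fun sol s => sol ++ [f s]) acc = acc ++ scope.map f := by
  induction scope generalizing acc with
  | nil => simp
  | cons s ss ih => simp [List.foldl, ih]

-- ===== VERDICT (by name: the statement is the Claim_ definition above) =====
theorem precedence_spec : Claim_equal_precedence := by
  intro trace scope c1s c2s _ _
  show precedence trace scope c1s c2s = precedence_alt trace scope c1s c2s
  show List.foldl (fun sol s => sol ++
      [precDec (precInner c1s c2s
        (PySem.List.slice trace (some (PySem.List.pyGetD s 0 0)) (some (PySem.List.pyGetD s 1 0 + 1)))
        (-1) (-1) 0)]) [] scope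
    = scope.map (fun s =>
        altCheck (PySem.Set.ofList c1s) (PySem.Set.ofList c2s)
          (PySem.List.slice trace (some (PySem.List.pyGetD s 0 0)) (some (PySem.List.pyGetD s 1 0 + 1))))
  rw [foldl_append_eq_map_prec]
  simp only [List.nil_append]
  exact List.map_congr_left (fun s _ => inner_eq_alt c1s c2s _ 0 le_rfl)
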